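-- pv_equiv track=rewrite | github.com/sst2001/spark-website-vercel | reorder_blog.py | get_grid_positions
-- ===== SOURCE A (Python) =====
-- def get_grid_positions(num_posts):
--     positions = []
--     row = 1
--     col = 1
--     for i in range(num_posts):
--         positions.append((col, row, 200 + i * 200))
--         col += 1
--         if col > 3:
--             col = 1
--             row += 1
--     return positions
-- ===== SOURCE B (Python) =====
-- def get_grid_positions(num_posts):
--     positions = []
--     row = 1
--     i = 0
--     while i < num_posts:
--         for col in range(1, min(3, num_posts - i) + 1):
--             positions.append((col, row, 200 + (i + col - 1) * 200))
--         i += 3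
--         row += 1
--     return positions
-- ===== Notes on version B (the rewrite author's own statement) =====
-- stated objective: alternative
-- what changed: Replaces A's flat per-item loop with wrapping col/row counters by a row-chunked generation: an outer loop over rows of three that emits each (possibly truncated) row whole with an inner column loop, no wrap/reset branch and no per-item state carried between items.
import Mathlib
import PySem

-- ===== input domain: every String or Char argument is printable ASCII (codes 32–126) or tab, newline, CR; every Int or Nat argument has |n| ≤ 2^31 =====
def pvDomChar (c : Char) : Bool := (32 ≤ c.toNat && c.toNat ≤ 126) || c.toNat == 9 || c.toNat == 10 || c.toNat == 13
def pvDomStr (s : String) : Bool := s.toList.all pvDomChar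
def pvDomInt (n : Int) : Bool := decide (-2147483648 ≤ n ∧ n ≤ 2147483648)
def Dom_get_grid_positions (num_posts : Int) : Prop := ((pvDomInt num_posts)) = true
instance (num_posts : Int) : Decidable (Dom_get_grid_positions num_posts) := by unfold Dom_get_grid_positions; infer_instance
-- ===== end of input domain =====

-- B generates the grid row by row (outer loop over rows of three, inner loop over columns)
-- instead of A's flat per-item loop with wrapping col/row counters (alternative decomposition).

-- ===== PORT A =====
-- one loop step: append (col,row,offset), bump col, reset at 3
def gridStepA (st : List (Int × Int × Int) × Int × Int) (i : Int) :
    List (Int × Int × Int) × Int × Int :=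
  let positions := st.1 ++ [(st.2.2, st.2.1, 200 + i * 200)]
  let col := st.2.2 + 1
  if col > 3 then (positions, st.2.1 + 1, 1) else (positions, st.2.1, col)

def get_grid_positions (num_posts : Int) : List (Int × Int × Int) :=
  ((PySem.List.pyRange 0 num_posts 1).foldl gridStepA ([], 1, 1)).1

-- ===== PORT B =====
-- the while loop, as recursion on the remaining count (num_posts - i), which drops by 3 each row
def gridRowsB (remaining : Nat) (i row : Int) : List (Int × Int × Int) :=
  if remaining = 0 then []
  else
    ((PySem.List.pyRange 1 (min 3 (remaining : Int) + 1) 1).map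
        (fun col => (col, row, 200 + (i + col - 1) * 200)))
      ++ gridRowsB (remaining - 3) (i + 3) (row + 1)
termination_by remaining
decreasing_by omega

def get_grid_positions_alt (num_posts : Int) : List (Int × Int × Int) :=
  gridRowsB num_posts.toNat 0 1

-- ===== PRECONDITION & SPEC =====
def Spec_get_grid_positions (num_posts : Int) (out : List (Int × Int × Int)) : Prop := out = get_grid_positions_alt num_posts
instance (num_posts : Int) (out : List (Int × Int × Int)) : Decidable (Spec_get_grid_positions num_posts out) := by unfold Spec_get_grid_positions; infer_instance

-- ===== CLAIM (what is proved, stated in full; the proofs are below) =====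
def Claim_equal_get_grid_positions : Prop := ∀ (num_posts : Int), Dom_get_grid_positions num_posts → Spec_get_grid_positions num_posts (get_grid_positions num_posts)

-- ===== LEMMAS AND PROOFS =====

-- A's loop invariant: after n steps the state is the closed-form list with row = n/3+1, col = n%3+1
theorem gridA_inv (n : Nat) :
    (PySem.List.pyRange 0 (n : Int) 1).foldl gridStepA ([], 1, 1) =
      ((List.range n).map (fun k : Nat => (((k : Int) % 3) + 1, ((k : Int) / 3) + 1, 200 + (k : Int) * 200)),
       ((n : Int) / 3) + 1, ((n : Int) % 3) + 1) := by
  induction n with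
  | zero => simp [PySem.List.pyRange_one_eq_nil]
  | succ m ih =>
    rw [show ((m + 1 : Nat) : Int) = (m : Int) + 1 by push_cast; ring,
        PySem.List.pyRange_one_succ_right (by positivity), List.foldl_append, ih]
    simp only [List.foldl, gridStepA, List.range_succ, List.map_append, List.map_cons, List.map_nil]
    by_cases h : (m : Int) % 3 + 1 + 1 > 3
    · simp only [if_pos h, Prod.mk.injEq]
      refine ⟨trivial, by omega, by omega⟩
    · simp only [if_neg h, Prod.mk.injEq]
      refine ⟨trivial, by omega, by omega⟩

-- B's rows reach the same closed form (generalized over the start index and row)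
theorem gridRowsB_eq (n : Nat) (i row : Int) :
    gridRowsB n i row =
      (List.range n).map (fun k : Nat =>
        (((k : Int) % 3) + 1, row + (k : Int) / 3, 200 + (i + k) * 200)) := by
  induction n using Nat.strong_induction_on generalizing i row with
  | _ n ih =>
    rw [gridRowsB]
    rcases Nat.lt_or_ge n 3 with h3 | h3
    · interval_cases n
      · simp
      · rw [gridRowsB]
        norm_num [show PySem.List.pyRange 1 2 1 = [1] from by decide, List.range_succ]
      · rw [gridRowsB]
        norm_num [show PySem.List.pyRange 1 3 1 = [1, 2] from by decide,
          show List.range 2 = [0, 1] from by decide]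
        ring
    · have hne : n ≠ 0 := by omega
      have hmin : min 3 ((n : Nat) : Int) = 3 := by omega
      rw [if_neg hne, hmin, show PySem.List.pyRange 1 (3 + 1) 1 = [1, 2, 3] from by decide,
        ih (n - 3) (by omega) (i + 3) (row + 1)]
      conv_rhs => rw [show n = 3 + (n - 3) from by omega, List.range_add]
      simp only [List.map_append, List.map_map, List.map_cons, List.map_nil,
        show List.range 3 = [0, 1, 2] from by decide,
        List.cons_append, List.nil_append, List.cons.injEq, Prod.mk.injEq]
      refine ⟨⟨by norm_num, by norm_num, by push_cast; ring⟩,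
        ⟨by norm_num, by norm_num, by push_cast; ring⟩,
        ⟨by norm_num, by norm_num, by push_cast; ring⟩, ?_⟩
      apply List.map_congr_left
      intro k _
      simp only [Function.comp_apply, Prod.mk.injEq]
      refine ⟨by omega, by push_cast; omega, by push_cast; ring⟩

-- ===== VERDICT (by name: the statement is the Claim_ definition above) =====
theorem get_grid_positions_spec : Claim_equal_get_grid_positions := by
  intro n _
  unfold Spec_get_grid_positions
  rcases (by omega : n ≤ 0 ∨ 0 < n) with h | h
  · rw [get_grid_positions, get_grid_positions_alt, PySem.List.pyRange_one_eq_nil h,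
      show n.toNat = 0 from by omega, gridRowsB]
    simp
  · have hn : n = ((n.toNat : Nat) : Int) := by omega
    rw [get_grid_positions, get_grid_positions_alt, hn, gridA_inv, gridRowsB_eq]
    apply List.map_congr_left
    intro k _
    simp only [Prod.mk.injEq]
    refine ⟨trivial, by ring, by push_cast; ring⟩
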